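-- pv_equiv track=rewrite | github.com/CJ-Chen/HiMT | assemble.py | get_reversed_complement
-- ===== SOURCE A (Python) =====
-- def get_reversed_complement(sequence):
--     new_seq=''
--     complement_dic={"A":"T","T":"A","G":"C","C":"G"}
--     for item in reversed(sequence.upper()):
--         try:
--             new_seq+=complement_dic[item]
--         except KeyError:
--             new_seq+=item
--     return new_seq
-- ===== SOURCE B (Python) =====
-- def get_reversed_complement(sequence):
--     s = sequence.upper()
--     comp = {"A": "T", "T": "A", "G": "C", "C": "G"}
--
--     def rc(lo, hi):
--         # reverse-complement of s[lo:hi] by divide and conquer: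
--         # rc(lo,hi) = rc(mid,hi) + rc(lo,mid)
--         if hi - lo <= 1:
--             if lo >= hi:
--                 return ''
--             ch = s[lo]
--             return comp.get(ch, ch)
--         mid = (lo + hi) // 2
--         return rc(mid, hi) + rc(lo, mid)
--
--     return rc(0, len(s))
-- ===== Notes on version B (the rewrite author's own statement) =====
-- stated objective: alternative
-- what changed: Replaces A's linear reverse-iteration loop with try/except by a divide-and-conquer recursion on index halves: rc(lo,hi)=rc(mid,hi)+rc(lo,mid), complementing a single base at the leaves, so no reversal pass or exception handling exists.
import Mathlib
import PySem

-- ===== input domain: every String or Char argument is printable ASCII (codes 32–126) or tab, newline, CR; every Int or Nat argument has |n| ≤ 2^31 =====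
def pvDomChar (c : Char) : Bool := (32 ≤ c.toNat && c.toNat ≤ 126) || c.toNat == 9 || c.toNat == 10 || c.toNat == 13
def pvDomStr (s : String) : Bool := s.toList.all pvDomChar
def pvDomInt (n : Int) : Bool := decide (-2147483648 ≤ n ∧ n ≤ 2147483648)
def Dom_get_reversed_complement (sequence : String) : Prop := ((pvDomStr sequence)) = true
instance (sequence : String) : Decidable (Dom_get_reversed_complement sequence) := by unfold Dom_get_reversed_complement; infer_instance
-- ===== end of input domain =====

-- B replaces A's reverse-iteration loop by divide-and-conquer on index halves (objective: alternative).
-- Shared single-character table: complement of a base, unknown characters pass through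
-- (A's KeyError fallback; B's dict.get default).
def pvComp (c : Char) : Char :=
  if c = 'A' then 'T' else if c = 'T' then 'A' else if c = 'G' then 'C' else if c = 'C' then 'G' else c

-- ===== PORT A =====
-- A: reverse-iterate the upper-cased string, appending complement (dict hit) or the char itself.
def get_reversed_complement (sequence : String) : String :=
  String.ofList ((PySem.Str.upper sequence).toList.reverse.foldl
    (fun acc item => acc ++ [pvComp item]) [])

-- ===== PORT B =====
-- B's inner rc(lo,hi): divide and conquer; s[lo] is always in range when called (lo < hi ≤ length),
-- so the index is ported with getD (exact there).
def pvRC (s : List Char) (lo hi : Nat) : List Char :=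
  if hi - lo ≤ 1 then
    if lo ≥ hi then [] else [pvComp (s.getD lo ' ')]
  else
    pvRC s ((lo + hi) / 2) hi ++ pvRC s lo ((lo + hi) / 2)
termination_by hi - lo
decreasing_by all_goals omega

def get_reversed_complement_alt (sequence : String) : String :=
  String.ofList (pvRC (PySem.Str.upper sequence).toList 0 (PySem.Str.upper sequence).toList.length)

-- ===== PRECONDITION & SPEC =====
def Spec_get_reversed_complement (sequence : String) (out : String) : Prop := out = get_reversed_complement_alt sequence
instance (sequence : String) (out : String) : Decidable (Spec_get_reversed_complement sequence out) := by unfold Spec_get_reversed_complement; infer_instance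

-- ===== CLAIM (what is proved, stated in full; the proofs are below) =====
def Claim_equal_get_reversed_complement : Prop := ∀ (sequence : String), Dom_get_reversed_complement sequence → Spec_get_reversed_complement sequence (get_reversed_complement sequence)

-- ===== LEMMAS AND PROOFS =====

theorem pvFoldAppend (l acc : List Char) :
    l.foldl (fun acc item => acc ++ [pvComp item]) acc = acc ++ l.map pvComp := by
  induction l generalizing acc with
  | nil => simp
  | cons c l ih => simp [List.foldl, ih]

-- characterisation of B's recursion: rc(lo,hi) is the reversed complement of s[lo:hi]
theorem pvRC_eq (s : List Char) (lo hi : Nat) (hhi : hi ≤ s.length) :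
    pvRC s lo hi = (((s.drop lo).take (hi - lo)).map pvComp).reverse := by
  generalize hn : hi - lo = n
  induction n using Nat.strong_induction_on generalizing lo hi with
  | _ n ih =>
    subst hn
    rw [pvRC]
    by_cases hle : hi - lo ≤ 1
    · simp only [hle, if_true]
      by_cases hge : lo ≥ hi
      · simp [hge, show hi - lo = 0 by omega]
      · have hlo : lo < s.length := by omega
        have h1 : hi - lo = 1 := by omega
        rw [List.drop_eq_getElem_cons hlo, h1, if_neg hge]
        simp only [List.take_succ_cons, List.take_zero, List.map_cons, List.map_nil,
          List.reverse_cons, List.reverse_nil, List.nil_append]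
        rw [List.getD_eq_getElem?_getD, List.getElem?_eq_getElem hlo]
        rfl
    · simp only [hle, if_false]
      have h1 : hi - (lo + hi) / 2 < hi - lo := by omega
      have h2 : (lo + hi) / 2 - lo < hi - lo := by omega
      rw [ih _ h1 ((lo+hi)/2) hi hhi rfl, ih _ h2 lo ((lo+hi)/2) (by omega) rfl]
      have hsplit : (s.drop lo).take (hi - lo)
          = (s.drop lo).take ((lo+hi)/2 - lo) ++ (s.drop ((lo+hi)/2)).take (hi - (lo+hi)/2) := by
        have hd : s.drop ((lo+hi)/2) = (s.drop lo).drop ((lo+hi)/2 - lo) := by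
          rw [List.drop_drop]; congr 1; omega
        rw [hd, ← List.take_add, show (lo+hi)/2 - lo + (hi - (lo+hi)/2) = hi - lo by omega]
      rw [hsplit]
      simp

-- ===== VERDICT (by name: the statement is the Claim_ definition above) =====
theorem get_reversed_complement_spec : Claim_equal_get_reversed_complement := by
  intro s _
  unfold Spec_get_reversed_complement get_reversed_complement get_reversed_complement_alt
  rw [pvFoldAppend, pvRC_eq _ _ _ (le_refl _)]
  simp [List.map_reverse]
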